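-- pv_equiv track=rewrite | github.com/QuarKUS7/AoC2020 | 10/day10_1.py | compute_coeficient
-- ===== SOURCE A (Python) =====
-- def compute_coeficient(groups):
--     combinations = 1
--     for group in groups:
--         if len(group) == 3:
--             combinations *= 7
--         elif len(group) == 2:
--             combinations *= 4
--         elif len(group) == 1:
--             combinations *= 2
--     return combinations
-- ===== SOURCE B (Python) =====
-- def compute_coeficient(groups):
--     lengths = [len(g) for g in groups]
--     c1 = lengths.count(1)
--     c2 = lengths.count(2)
--     c3 = lengths.count(3)
--     return 2 ** c1 * 4 ** c2 * 7 ** c3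
-- ===== Notes on version B (the rewrite author's own statement) =====
-- stated objective: alternative
-- what changed: B tallies how many groups have length 1, 2 and 3 and returns the closed-form product 2**c1 * 4**c2 * 7**c3, replacing A's interleaved per-group multiply loop.
import Mathlib
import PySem

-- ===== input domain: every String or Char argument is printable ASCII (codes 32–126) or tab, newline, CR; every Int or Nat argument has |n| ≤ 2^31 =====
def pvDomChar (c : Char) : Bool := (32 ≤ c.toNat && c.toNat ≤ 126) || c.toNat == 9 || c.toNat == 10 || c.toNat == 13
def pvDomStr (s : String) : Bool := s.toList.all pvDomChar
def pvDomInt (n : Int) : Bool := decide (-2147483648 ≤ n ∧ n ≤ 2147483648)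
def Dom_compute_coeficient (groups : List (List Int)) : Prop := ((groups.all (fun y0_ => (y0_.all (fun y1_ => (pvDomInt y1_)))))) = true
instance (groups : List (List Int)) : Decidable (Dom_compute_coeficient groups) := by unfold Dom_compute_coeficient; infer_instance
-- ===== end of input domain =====

-- B tallies counts of group lengths 1/2/3 and returns the closed-form product 2^c1*4^c2*7^c3 (alternative decomposition; same cost).


-- ===== PORT A =====
def compute_coeficient (groups : List (List Int)) : Int :=
  groups.foldl (fun combinations group =>
    if group.length = 3 then combinations * 7
    else if group.length = 2 then combinations * 4
    else if group.length = 1 then combinations * 2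
    else combinations) 1

-- ===== PORT B =====
def compute_coeficient_alt (groups : List (List Int)) : Int :=
  let lengths := groups.map (fun g => (g.length : Int))
  let c1 := lengths.count 1
  let c2 := lengths.count 2
  let c3 := lengths.count 3
  2 ^ c1 * 4 ^ c2 * 7 ^ c3

-- ===== PRECONDITION & SPEC =====
def Spec_compute_coeficient (groups : List (List Int)) (out : Int) : Prop := out = compute_coeficient_alt groups
instance (groups : List (List Int)) (out : Int) : Decidable (Spec_compute_coeficient groups out) := by unfold Spec_compute_coeficient; infer_instance

-- ===== CLAIM (what is proved, stated in full; the proofs are below) =====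
def Claim_equal_compute_coeficient : Prop := ∀ (groups : List (List Int)), Dom_compute_coeficient groups → Spec_compute_coeficient groups (compute_coeficient groups)

-- ===== LEMMAS AND PROOFS =====
theorem cc_foldl_acc (groups : List (List Int)) (acc : Int) :
    groups.foldl (fun combinations group =>
      if group.length = 3 then combinations * 7
      else if group.length = 2 then combinations * 4
      else if group.length = 1 then combinations * 2
      else combinations) acc = acc * compute_coeficient_alt groups := by
  induction groups generalizing acc with
  | nil => simp [compute_coeficient_alt]
  | cons g gs ih =>
    simp only [List.foldl_cons, ih]
    simp only [compute_coeficient_alt, List.map_cons, List.count_cons]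
    split_ifs with h3 h2 h1 <;> simp_all [pow_succ] <;> (first | ring1 | omega)

-- ===== VERDICT (by name: the statement is the Claim_ definition above) =====
theorem compute_coeficient_spec : Claim_equal_compute_coeficient := by
  intro groups _
  unfold Spec_compute_coeficient compute_coeficient
  rw [cc_foldl_acc]
  ring
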